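-- pv_equiv track=rewrite | github.com/SamLubbers/ml-numpy-examples | classification/naïve-bayes/word_embedding.py | word2vector
-- ===== SOURCE A (Python) =====
-- def word2vector(vocab_list, text):
--     """converts a text onto a vector with vocabulary words as features
--     with value 1 if word occurs in text and 0 if it doesn't
--     :param vocab_list: set of words in our vocabulary
--     :param text: text we want to convert to a vector
--     :return: vector representing text
--     """
--     word_vec = []
--     text = text.split()
--     for word in vocab_list:
--         if word in text:
--             word_vec.append(1)
--         else:
--             word_vec.append(0)
--     return word_vec
-- ===== SOURCE B (Python) =====
-- def word2vector(vocab_list, text):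
--     """converts a text onto a vector with vocabulary words as features
--     with value 1 if word occurs in text and 0 if it doesn't
--     """
--     index = {}
--     for i, word in enumerate(vocab_list):
--         index.setdefault(word, []).append(i)
--     word_vec = [0] * len(vocab_list)
--     for word in text.split():
--         for i in index.get(word, []):
--             word_vec[i] = 1
--     return word_vec
-- ===== Notes on version B (the rewrite author's own statement) =====
-- stated objective: alternative
-- what changed: Instead of scanning the text word list once per vocabulary word, B builds an inverted index word->positions over vocab_list once, allocates a zero vector, and drives a single loop over text.split() setting the indexed positions to 1.
import Mathlib
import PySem

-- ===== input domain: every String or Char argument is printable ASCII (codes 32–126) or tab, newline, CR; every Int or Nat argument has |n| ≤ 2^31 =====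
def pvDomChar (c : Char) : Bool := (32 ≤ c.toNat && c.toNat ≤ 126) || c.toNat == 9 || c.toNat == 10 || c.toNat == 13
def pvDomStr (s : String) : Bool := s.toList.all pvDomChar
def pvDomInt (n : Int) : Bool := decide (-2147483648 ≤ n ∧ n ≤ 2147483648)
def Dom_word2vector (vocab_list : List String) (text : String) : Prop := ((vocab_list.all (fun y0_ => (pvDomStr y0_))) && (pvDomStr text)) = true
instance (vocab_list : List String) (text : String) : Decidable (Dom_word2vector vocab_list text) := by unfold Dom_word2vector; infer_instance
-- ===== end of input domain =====

-- B replaces A's per-vocabulary-word scan of the text by a text-driven loop over a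
-- prebuilt inverted index (word → all its positions in vocab_list); objective: alternative.

-- ===== PORT A =====
def word2vector (vocab_list : List String) (text : String) : List Int :=
  let t := PySem.Str.split₀ text
  vocab_list.foldl (fun word_vec word =>
    if word ∈ t then word_vec ++ [1] else word_vec ++ [0]) []

-- ===== PORT B =====
def word2vector_alt (vocab_list : List String) (text : String) : List Int :=
  let index : PySem.Dict String (List Int) :=
    (PySem.List.enumerate vocab_list 0).foldl
      (fun d p => d.modify p.2 [] (fun l => l ++ [p.1])) PySem.Dict.empty
  let vec0 := List.replicate vocab_list.length (0 : Int)
  (PySem.Str.split₀ text).foldl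
    (fun word_vec word =>
      (index.getD word []).foldl (fun v i => PySem.List.pySetD v i 1) word_vec) vec0

-- ===== PRECONDITION & SPEC =====
def Spec_word2vector (vocab_list : List String) (text : String) (out : List Int) : Prop := out = word2vector_alt vocab_list text
instance (vocab_list : List String) (text : String) (out : List Int) : Decidable (Spec_word2vector vocab_list text out) := by unfold Spec_word2vector; infer_instance

-- ===== CLAIM (what is proved, stated in full; the proofs are below) =====
def Claim_equal_word2vector : Prop := ∀ (vocab_list : List String) (text : String), Dom_word2vector vocab_list text → Spec_word2vector vocab_list text (word2vector vocab_list text)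

-- ===== LEMMAS AND PROOFS =====

-- the list of positions of word w in vocab (what B's inverted index stores under w)
def posList (vocab : List String) (w : String) : List Int :=
  ((PySem.List.enumerate vocab 0).filter (fun p => p.2 == w)).map (·.1)

lemma getD_index (vocab : List String) (w : String) :
    (((PySem.List.enumerate vocab 0).foldl
        (fun d p => d.modify p.2 [] (fun l => l ++ [p.1]))
        (PySem.Dict.empty : PySem.Dict String (List Int))).getD w [])
      = posList vocab w := by
  have h := PySem.Dict.getD_foldl_modify_append
      ((PySem.List.enumerate vocab 0).map Prod.swap)
      (PySem.Dict.empty : PySem.Dict String (List Int)) w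
  rw [List.foldl_map] at h
  simp only [Prod.fst_swap, Prod.snd_swap, PySem.Dict.getD_empty, List.nil_append,
    List.filter_map, List.map_map] at h
  rw [h]
  rfl

lemma mem_posList (vocab : List String) (w : String) (i : Int) :
    i ∈ posList vocab w ↔ ∃ (k : Nat) (h : k < vocab.length), i = (k : Int) ∧ vocab[k] = w := by
  unfold posList
  simp only [List.mem_map, List.mem_filter, PySem.List.mem_enumerate_iff]
  constructor
  · rintro ⟨p, ⟨⟨k, hk, rfl⟩, hw⟩, rfl⟩
    exact ⟨k, hk, by simp, by simpa using hw⟩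
  · rintro ⟨k, hk, rfl, hw⟩
    exact ⟨((k : Int), vocab[k]), ⟨⟨k, hk, by simp⟩, by simpa using hw⟩, rfl⟩

lemma set_getElem?_one (vec : List Int) (k j : Nat) :
    (vec.set k 1)[j]? = if k = j then vec[j]?.map (fun _ => (1 : Int)) else vec[j]? := by
  rw [List.getElem?_set]
  by_cases h : k = j
  · subst h
    by_cases hl : k < vec.length <;>
      simp [hl]
  · simp [h]

lemma setfold_getElem? (ps : List Int) (vec : List Int) (j : Nat)
    (hps : ∀ i ∈ ps, 0 ≤ i) :
    (ps.foldl (fun v i => PySem.List.pySetD v i 1) vec)[j]?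
      = if (j : Int) ∈ ps then vec[j]?.map (fun _ => (1 : Int)) else vec[j]? := by
  induction ps generalizing vec with
  | nil => simp
  | cons i ps ih =>
    have hi : (0 : Int) ≤ i := hps i (by simp)
    simp only [List.foldl_cons]
    rw [PySem.List.pySetD_of_nonneg _ _ hi,
      ih _ (fun x hx => hps x (by simp [hx]))]
    simp only [set_getElem?_one]
    by_cases hij : (j : Int) = i
    · have h1 : i.toNat = j := by omega
      by_cases hmem : (j : Int) ∈ ps <;>
        simp [h1, hij, Option.map_map, Function.comp_def]
    · have h1 : i.toNat ≠ j := by omega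
      by_cases hmem : (j : Int) ∈ ps <;> simp [h1, hij, hmem]

lemma step_lemma (vocab : List String) (w : String) (f : String → Int) :
    (posList vocab w).foldl (fun v i => PySem.List.pySetD v i 1) (vocab.map f)
      = vocab.map (fun v => if v = w then 1 else f v) := by
  have hnn : ∀ i ∈ posList vocab w, (0 : Int) ≤ i := by
    intro i hi
    rcases (mem_posList vocab w i).1 hi with ⟨k, hk, rfl, _⟩
    exact Int.natCast_nonneg k
  apply List.ext_getElem?
  intro j
  rw [setfold_getElem? _ _ _ hnn]
  by_cases hj : j < vocab.length
  · by_cases hmem : (j : Int) ∈ posList vocab w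
    · rcases (mem_posList vocab w _).1 hmem with ⟨k, hk, hjk, hw⟩
      have hkj : k = j := by omega
      subst hkj
      simp [hmem, hj, hw]
    · have hne : vocab[j] ≠ w := by
        intro hw
        exact hmem ((mem_posList vocab w _).2 ⟨j, hj, rfl, hw⟩)
      simp [hmem, hj, hne]
  · have : ¬ (j : Int) ∈ posList vocab w := by
      intro hmem
      rcases (mem_posList vocab w _).1 hmem with ⟨k, hk, hjk, _⟩
      omega
    simp [this, List.getElem?_eq_none (by simpa using hj : (vocab.map f).length ≤ j),
      List.getElem?_eq_none (by simpa using hj :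
        (vocab.map (fun v => if v = w then (1 : Int) else f v)).length ≤ j)]

def indf (S : List String) (v : String) : Int := if v ∈ S then 1 else 0

lemma main_fold (vocab : List String) (ws : List String) (S : List String) :
    ws.foldl (fun vec w => (posList vocab w).foldl (fun v i => PySem.List.pySetD v i 1) vec)
        (vocab.map (indf S))
      = vocab.map (indf (S ++ ws)) := by
  induction ws generalizing S with
  | nil => simp
  | cons w ws ih =>
    simp only [List.foldl_cons]
    rw [step_lemma]
    have hf : (fun v => if v = w then (1 : Int) else indf S v) = indf (S ++ [w]) := by
      funext v
      by_cases h : v = w <;> simp [indf, h]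
    rw [hf, ih (S ++ [w])]
    simp

lemma A_as_map (t : List String) (vocab : List String) (acc : List Int) :
    vocab.foldl (fun wv w => if w ∈ t then wv ++ [1] else wv ++ [0]) acc
      = acc ++ vocab.map (indf t) := by
  induction vocab generalizing acc with
  | nil => simp
  | cons v vocab ih =>
    by_cases h : v ∈ t <;> simp [ih, indf, h]

-- ===== VERDICT (by name: the statement is the Claim_ definition above) =====
theorem word2vector_spec : Claim_equal_word2vector := by
  intro vocab text _
  unfold Spec_word2vector word2vector word2vector_alt
  simp only []
  rw [A_as_map, List.nil_append]
  have hfun : (fun (word_vec : List Int) (word : String) =>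
      ((((PySem.List.enumerate vocab 0).foldl
          (fun d p => d.modify p.2 [] (fun l => l ++ [p.1]))
          (PySem.Dict.empty : PySem.Dict String (List Int))).getD word []).foldl
        (fun v i => PySem.List.pySetD v i 1) word_vec))
    = fun (word_vec : List Int) (word : String) =>
        (posList vocab word).foldl (fun v i => PySem.List.pySetD v i 1) word_vec := by
    funext vec w
    rw [getD_index]
  rw [hfun]
  have hrep : vocab.map (indf []) = List.replicate vocab.length (0 : Int) := by
    have h0 : indf [] = fun _ => (0 : Int) := by funext v; simp [indf]
    rw [h0, List.map_const']
  rw [← hrep, main_fold vocab (PySem.Str.split₀ text) []]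
  simp
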